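-- pv_equiv track=rewrite | github.com/IsaacAlves7/python | Procedural/Procedural Python Exercises/ex024-função.py | numberDistribution
-- ===== SOURCE A (Python) =====
-- def numberDistribution(nums):
--     n = 0
--     for x in range(len(nums)):
--         for k in range(len(nums)+1):
--             nums[x].append(n)
--             n += 1
--         n = nums[x][-1] + 1
--     result = [N[::-1] for N in nums]
--     return result
-- ===== SOURCE B (Python) =====
-- def numberDistribution(nums):
--     c = len(nums) + 1
--     return [list(range((x + 1) * c - 1, x * c - 1, -1)) + row[::-1]
--             for x, row in enumerate(nums)]
-- ===== Notes on version B (the rewrite author's own statement) =====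
-- stated objective: simpler
-- what changed: B eliminates A's two-stage fill-ascending-with-a-threaded-counter-then-reverse approach: it builds each output row directly in descending order from closed-form bounds range((x+1)*c-1, x*c-1, -1) plus the reversed original content, in one comprehension; B does not mutate nums (A appends to its sublists), equivalence is about the return value.
import Mathlib
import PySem

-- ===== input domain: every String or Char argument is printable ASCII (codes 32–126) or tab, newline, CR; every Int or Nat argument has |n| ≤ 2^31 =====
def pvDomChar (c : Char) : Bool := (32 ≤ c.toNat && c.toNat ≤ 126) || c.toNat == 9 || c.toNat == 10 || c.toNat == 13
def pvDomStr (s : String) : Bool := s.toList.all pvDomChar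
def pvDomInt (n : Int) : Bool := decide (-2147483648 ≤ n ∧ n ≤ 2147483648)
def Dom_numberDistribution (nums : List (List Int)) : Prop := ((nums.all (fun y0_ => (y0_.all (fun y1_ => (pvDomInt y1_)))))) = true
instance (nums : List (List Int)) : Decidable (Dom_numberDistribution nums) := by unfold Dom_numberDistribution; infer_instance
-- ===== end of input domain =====

-- One honest line: B skips A's fill-ascending-then-reverse stage entirely and constructs each
-- output row directly in descending order from closed-form bounds (range((x+1)*c-1, x*c-1, -1))
-- followed by the reversed old content (simpler decomposition, same cost).  A mutates the
-- sublists of `nums` in place while B does not; the theorems here are about the RETURN value.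

-- ===== PORT A =====
-- inner `for k in range(len(nums)+1): nums[x].append(n); n += 1` over state (nums, n)
def pvAInner (x : Nat) (c : Nat) (s : List (List Int) × Int) : List (List Int) × Int :=
  (List.range c).foldl (fun t _ => (t.1.set x ((t.1.getD x []) ++ [t.2]), t.2 + 1)) s

-- one iteration of `for x in range(len(nums))`: inner loop, then `n = nums[x][-1] + 1`
def pvAStep (x : Nat) (c : Nat) (s : List (List Int) × Int) : List (List Int) × Int :=
  let t := pvAInner x c s
  (t.1, ((t.1.getD x []).getLast?.getD 0) + 1)

def numberDistribution (nums : List (List Int)) : List (List Int) :=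
  let fin := (List.range nums.length).foldl (fun s x => pvAStep x (nums.length + 1) s) (nums, 0)
  fin.1.map (fun N => N.reverse)

-- ===== PORT B =====
-- hand port of `list(range(a, b, -1))` (exact: equals PySem.List.pyRange a b (-1) by
-- PySem.List.pyRange_neg_one; ported by hand only because pyRange evaluates slowly)
def pvRangeDesc (a b : Int) : List Int :=
  (List.range (a - b).toNat).map (fun (k : Nat) => a - (k : Int))

def numberDistribution_alt (nums : List (List Int)) : List (List Int) :=
  let c : Int := nums.length + 1
  nums.zipIdx.map (fun p =>
    pvRangeDesc (((p.2 : Int) + 1) * c - 1) ((p.2 : Int) * c - 1) ++ p.1.reverse)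

-- ===== PRECONDITION & SPEC =====
def Spec_numberDistribution (nums : List (List Int)) (out : List (List Int)) : Prop := out = numberDistribution_alt nums
instance (nums : List (List Int)) (out : List (List Int)) : Decidable (Spec_numberDistribution nums out) := by unfold Spec_numberDistribution; infer_instance

-- ===== CLAIM (what is proved, stated in full; the proofs are below) =====
def Claim_equal_numberDistribution : Prop := ∀ (nums : List (List Int)), Dom_numberDistribution nums → Spec_numberDistribution nums (numberDistribution nums)

-- ===== LEMMAS AND PROOFS =====

-- row filled with the c consecutive ints starting at i*c, appended after its old content
def pvFill (nums : List (List Int)) (i : Nat) : List Int :=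
  nums.getD i [] ++ (List.range (nums.length + 1)).map (fun (k : Nat) => (i : Int) * ((nums.length : Int) + 1) + (k : Int))

theorem pvAInner_eq (x : Nat) : ∀ (c : Nat) (l : List (List Int)) (n : Int), x < l.length →
    pvAInner x c (l, n) =
      (l.set x ((l.getD x []) ++ (List.range c).map (fun (k : Nat) => n + (k : Int))), n + c) := by
  intro c
  induction c with
  | zero =>
    intro l n h
    simp [pvAInner, List.getD, List.getElem?_eq_getElem h, List.set_getElem_self]
  | succ c ih =>
    intro l n h
    simp only [pvAInner, List.range_succ, List.foldl_append, List.foldl_cons, List.foldl_nil]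
    rw [show (List.range c).foldl (fun t (_ : Nat) => (t.1.set x ((t.1.getD x []) ++ [t.2]), t.2 + 1)) (l, n) = pvAInner x c (l, n) from rfl, ih l n h]
    simp only [List.getD, List.getElem?_set_self h, Option.getD_some, List.set_set, Prod.mk.injEq]
    refine ⟨?_, by push_cast; ring⟩
    congr 1
    simp [List.map_append, List.append_assoc]

theorem pvLoopA (nums : List (List Int)) : ∀ (m : Nat), m ≤ nums.length →
    (((List.range m).foldl (fun s x => pvAStep x (nums.length + 1) s) (nums, 0)).2
        = (m : Int) * ((nums.length : Int) + 1)) ∧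
    (((List.range m).foldl (fun s x => pvAStep x (nums.length + 1) s) (nums, 0)).1.length
        = nums.length) ∧
    (∀ i : Nat, ((List.range m).foldl (fun s x => pvAStep x (nums.length + 1) s) (nums, 0)).1.getD i []
        = if i < m then pvFill nums i else nums.getD i []) := by
  intro m
  induction m with
  | zero => intro _; simp
  | succ m ih =>
    intro hm
    have hm' : m ≤ nums.length := Nat.le_of_succ_le hm
    obtain ⟨ihn, ihlen, ihget⟩ := ih hm'
    set F := (List.range m).foldl (fun s x => pvAStep x (nums.length + 1) s) (nums, 0) with hF
    have hxl : m < F.1.length := by omega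
    have hstep : (List.range (m+1)).foldl (fun s x => pvAStep x (nums.length + 1) s) (nums, 0)
        = pvAStep m (nums.length + 1) F := by
      simp [List.range_succ, hF]
    have hgetm : F.1.getD m [] = nums.getD m [] := by
      have := ihget m; simpa using this
    have hin := pvAInner_eq m (nums.length + 1) F.1 F.2 hxl
    have hrow : (F.1.getD m []) ++ (List.range (nums.length + 1)).map (fun (k : Nat) => F.2 + (k : Int))
        = pvFill nums m := by
      rw [hgetm, ihn]; rfl
    have hsetlen : (F.1.set m (pvFill nums m)).length = nums.length := by simpa using ihlen
    have hgetset : ∀ i : Nat, (F.1.set m (pvFill nums m)).getD i []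
        = if i < m + 1 then pvFill nums i else nums.getD i [] := by
      intro i
      by_cases hi : i = m
      · subst hi
        simp [List.getD, List.getElem?_set_self hxl]
      · have he : (F.1.set m (pvFill nums m)).getD i [] = F.1.getD i [] := by
          simp [List.getD, List.getElem?_set_ne (show m ≠ i from fun h => hi h.symm)]
        rw [he, ihget i]
        by_cases h' : i < m
        · simp [h', show i < m + 1 by omega]
        · simp [h', show ¬ i < m + 1 by omega]
    have hlast : (pvFill nums m).getLast?.getD 0
        = (m : Int) * ((nums.length : Int) + 1) + (nums.length : Int) := by
      unfold pvFill
      rw [List.range_succ, List.map_append]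
      simp [← List.append_assoc]
    rw [hstep]
    simp only [pvAStep, hin, hrow]
    refine ⟨?_, hsetlen, hgetset⟩
    rw [hgetset m]
    simp only [show m < m + 1 by omega, if_pos]
    rw [hlast]
    push_cast; ring

-- pvRangeDesc is exactly Python's range(a, b, -1)
theorem pvRangeDesc_eq (a b : Int) : pvRangeDesc a b = PySem.List.pyRange a b (-1) :=
  (PySem.List.pyRange_neg_one a b).symm

-- the reversed filled row IS B's descending range followed by the reversed old content
theorem pvFill_reverse (nums : List (List Int)) (i : Nat) :
    (pvFill nums i).reverse =
      pvRangeDesc (((i : Int) + 1) * ((nums.length : Int) + 1) - 1)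
        ((i : Int) * ((nums.length : Int) + 1) - 1) ++ (nums.getD i []).reverse := by
  unfold pvFill
  rw [List.reverse_append, pvRangeDesc_eq]
  congr 1
  rw [PySem.List.pyRange_neg_one_eq_reverse, PySem.List.pyRange_one]
  have h1 : ((i : Int) * ((nums.length : Int) + 1) - 1) + 1 = (i : Int) * ((nums.length : Int) + 1) := by ring
  have h2 : ((((i : Int) + 1) * ((nums.length : Int) + 1) - 1) + 1)
      - (i : Int) * ((nums.length : Int) + 1) = ((nums.length : Int) + 1) := by ring
  rw [h1, h2, show (((nums.length : Int) + 1)).toNat = nums.length + 1 by omega]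

-- ===== VERDICT (by name: the statement is the Claim_ definition above) =====
theorem numberDistribution_spec : Claim_equal_numberDistribution := by
  unfold Claim_equal_numberDistribution
  intro nums _
  unfold Spec_numberDistribution numberDistribution numberDistribution_alt
  obtain ⟨hn, hlen, hget⟩ := pvLoopA nums nums.length le_rfl
  simp only
  apply List.ext_getElem
  · simpa using hlen
  · intro i h1 h2
    have hi : i < nums.length := by simpa using h2
    have hil : i < (((List.range nums.length).foldl (fun s x => pvAStep x (nums.length + 1) s) (nums, 0)).1).length := by omega
    have hFi : (((List.range nums.length).foldl (fun s x => pvAStep x (nums.length + 1) s) (nums, 0)).1[i]'hil) = pvFill nums i := by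
      rw [← List.getD_eq_getElem _ [] hil, hget i, if_pos hi]
    simp only [List.getElem_map, hFi, List.getElem_zipIdx]
    rw [pvFill_reverse]
    simp [List.getD, List.getElem?_eq_getElem hi]
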